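-- pv_equiv track=rewrite | github.com/tianshapojun/INTERACTION_Dataset | main_anchor.py | is_satisfy
-- ===== SOURCE A (Python) =====
-- def is_satisfy(frame_list,past_num,future_num,frame_interval):
--     temp_list = []
--     frame_list.sort()
--     for i in frame_list:
--         temp = [j for j in range(i - past_num ,i + future_num + 1)]
--         if set(temp) <= set(frame_list):
--             if len(temp_list) > 0 and i < temp_list[-1] + frame_interval:
--                 continue
--             temp_list.append(i)
--     return temp_list
-- ===== SOURCE B (Python) =====
-- def is_satisfy(frame_list, past_num, future_num, frame_interval):
--     frame_list.sort()
--     vals = sorted(set(frame_list))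
--     run_hi = {}
--     for v in reversed(vals):
--         run_hi[v] = run_hi.get(v + 1, v)
--     out = []
--     for i in frame_list:
--         lo = i - past_num
--         hi = i + future_num
--         if lo > hi or (lo in run_hi and run_hi[lo] >= hi):
--             if not out or i >= out[-1] + frame_interval:
--                 out.append(i)
--     return out
-- ===== Notes on version B (the rewrite author's own statement) =====
-- stated objective: faster
-- what changed: Instead of materialising the whole window and doing a set-subset test against a freshly built set of the frame list for every candidate, B builds once a run-end index (value -> end of its maximal contiguous run) over the sorted distinct frames and decides each window by a single O(1) lookup: the window [i-past_num, i+future_num] is present iff it is empty or its left end is present with run end reaching its right end.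
import Mathlib
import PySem

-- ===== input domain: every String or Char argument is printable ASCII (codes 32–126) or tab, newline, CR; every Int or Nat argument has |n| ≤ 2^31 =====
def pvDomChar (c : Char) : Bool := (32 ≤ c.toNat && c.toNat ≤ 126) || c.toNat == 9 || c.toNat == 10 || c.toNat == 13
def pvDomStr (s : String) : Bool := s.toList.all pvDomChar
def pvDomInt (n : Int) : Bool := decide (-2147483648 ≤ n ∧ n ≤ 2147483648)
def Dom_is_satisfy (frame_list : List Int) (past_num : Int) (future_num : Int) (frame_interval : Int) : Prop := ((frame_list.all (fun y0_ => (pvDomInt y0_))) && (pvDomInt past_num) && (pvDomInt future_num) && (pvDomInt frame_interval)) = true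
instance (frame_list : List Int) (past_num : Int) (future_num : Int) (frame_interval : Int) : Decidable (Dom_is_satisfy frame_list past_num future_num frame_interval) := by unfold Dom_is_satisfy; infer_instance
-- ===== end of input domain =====

-- B replaces A's per-candidate window materialisation + set-subset test with a run-end index built
-- once over the sorted distinct frames and one O(1) lookup per candidate (objective: faster).
-- Python A sorts frame_list in place (B does the same); the equivalence proved is about the return value.

-- ===== PORT A =====
def is_satisfy (frame_list : List Int) (past_num : Int) (future_num : Int) (frame_interval : Int) : List Int :=
  let fl := PySem.List.sorted frame_list (fun x => x) false
  fl.foldl (fun temp_list i =>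
    let temp := PySem.List.pyRange (i - past_num) (i + future_num + 1) 1
    if PySem.Set.issubset (PySem.Set.ofList temp) (PySem.Set.ofList fl) then
      if temp_list.length > 0 ∧ i < PySem.List.pyGetD temp_list (-1) 0 + frame_interval then
        temp_list
      else
        temp_list ++ [i]
    else temp_list) []

-- ===== PORT B =====
def is_satisfy_alt (frame_list : List Int) (past_num : Int) (future_num : Int) (frame_interval : Int) : List Int :=
  let fl := PySem.List.sorted frame_list (fun x => x) false
  let vals := PySem.List.sorted (PySem.Set.ofList fl) (fun x => x) false
  let run_hi := vals.reverse.foldl (fun d v => d.insert v (d.getD (v + 1) v)) (PySem.Dict.empty : PySem.Dict Int Int)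
  fl.foldl (fun out i =>
    let lo := i - past_num
    let hi := i + future_num
    if lo > hi ∨ (run_hi.contains lo = true ∧ run_hi.getD lo 0 ≥ hi) then
      if out = [] ∨ i ≥ PySem.List.pyGetD out (-1) 0 + frame_interval then out ++ [i]
      else out
    else out) []

-- ===== PRECONDITION & SPEC =====
def Spec_is_satisfy (frame_list : List Int) (past_num : Int) (future_num : Int) (frame_interval : Int) (out : List Int) : Prop := out = is_satisfy_alt frame_list past_num future_num frame_interval
instance (frame_list : List Int) (past_num : Int) (future_num : Int) (frame_interval : Int) (out : List Int) : Decidable (Spec_is_satisfy frame_list past_num future_num frame_interval out) := by unfold Spec_is_satisfy; infer_instance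

-- ===== CLAIM (what is proved, stated in full; the proofs are below) =====
def Claim_equal_is_satisfy : Prop := ∀ (frame_list : List Int) (past_num : Int) (future_num : Int) (frame_interval : Int), Dom_is_satisfy frame_list past_num future_num frame_interval → Spec_is_satisfy frame_list past_num future_num frame_interval (is_satisfy frame_list past_num future_num frame_interval)

-- ===== LEMMAS AND PROOFS =====

-- B's run-end dictionary, written as a foldr (equal to B's reversed foldl by List.foldl_reverse).
def buildRun (vals : List Int) : PySem.Dict Int Int :=
  vals.foldr (fun v d => d.insert v (d.getD (v + 1) v)) PySem.Dict.empty

-- Specification of the run-end index on a strictly increasing list.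
theorem buildRun_spec (vals : List Int) (hs : vals.Pairwise (· < ·)) :
    (∀ v h, (buildRun vals).get? v = some h →
      v ∈ vals ∧ v ≤ h ∧ (∀ j, v ≤ j → j ≤ h → j ∈ vals) ∧ (h + 1) ∉ vals)
    ∧ (∀ v, v ∈ vals → ∃ h, (buildRun vals).get? v = some h) := by
  induction vals with
  | nil => simp [buildRun, PySem.Dict.get?_empty]
  | cons v0 rest ih =>
    rw [List.pairwise_cons] at hs
    obtain ⟨hlt, hrest⟩ := hs
    obtain ⟨ih1, ih2⟩ := ih hrest
    have hbr : buildRun (v0 :: rest)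
        = (buildRun rest).insert v0 ((buildRun rest).getD (v0 + 1) v0) := rfl
    have hnotv0 : v0 ∉ rest := fun hmem => absurd (hlt _ hmem) (lt_irrefl v0)
    constructor
    · intro v h hget
      rw [hbr, PySem.Dict.get?_insert] at hget
      by_cases hv : v = v0
      · subst hv
        rw [if_pos rfl, PySem.Dict.getD_eq_get?_getD] at hget
        injection hget with hget
        cases hget1 : (buildRun rest).get? (v + 1) with
        | some h1 =>
          rw [hget1] at hget; simp only [Option.getD_some] at hget; subst hget
          obtain ⟨hm1, hle1, hall1, hout1⟩ := ih1 _ _ hget1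
          refine ⟨List.mem_cons_self .., by omega, ?_, ?_⟩
          · intro j hj1 hj2
            by_cases hj : j = v
            · simp [hj]
            · exact List.mem_cons_of_mem _ (hall1 j (by omega) hj2)
          · intro hc
            rcases List.mem_cons.mp hc with hc | hc
            · have := hlt _ hm1; omega
            · exact hout1 hc
        | none =>
          rw [hget1] at hget; simp only [Option.getD_none] at hget; subst hget
          refine ⟨List.mem_cons_self .., le_refl _, ?_, ?_⟩
          · intro j hj1 hj2
            have : j = v := by omega
            simp [this]
          · intro hc
            rcases List.mem_cons.mp hc with hc | hc
            · omega
            · obtain ⟨h1, hh1⟩ := ih2 _ hc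
              rw [hget1] at hh1; exact absurd hh1 (by simp)
      · rw [if_neg hv] at hget
        obtain ⟨hm, hle, hall, hout⟩ := ih1 _ _ hget
        refine ⟨List.mem_cons_of_mem _ hm, hle, ?_, ?_⟩
        · intro j hj1 hj2; exact List.mem_cons_of_mem _ (hall j hj1 hj2)
        · intro hc
          rcases List.mem_cons.mp hc with hc | hc
          · have := hlt _ hm; omega
          · exact hout hc
    · intro v hv
      rw [hbr, PySem.Dict.get?_insert]
      by_cases hveq : v = v0
      · exact ⟨_, by rw [if_pos hveq]⟩
      · rcases List.mem_cons.mp hv with hc | hc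
        · exact absurd hc hveq
        · obtain ⟨h, hh⟩ := ih2 _ hc
          exact ⟨h, by rw [if_neg hveq]; exact hh⟩

-- A's set-subset window test equals B's run-end lookup test, for any window [lo, hi].
theorem window_iff (fl : List Int) (lo hi : Int) :
    (PySem.Set.issubset (PySem.Set.ofList (PySem.List.pyRange lo (hi + 1) 1)) (PySem.Set.ofList fl) = true)
    ↔ (lo > hi ∨ ((buildRun (PySem.List.sorted (PySem.Set.ofList fl) (fun x => x) false)).contains lo = true
        ∧ (buildRun (PySem.List.sorted (PySem.Set.ofList fl) (fun x => x) false)).getD lo 0 ≥ hi)) := by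
  set vals := PySem.List.sorted (PySem.Set.ofList fl) (fun x => x) false with hvals
  have hstrict : vals.Pairwise (· < ·) := PySem.List.sorted_ofList_pairwise_lt fl
  have hmemv : ∀ j : Int, j ∈ vals ↔ j ∈ fl := by
    intro j
    rw [hvals, PySem.List.mem_sorted, PySem.Set.mem_ofList]
  obtain ⟨hspec, hsome⟩ := buildRun_spec vals hstrict
  have hL : (PySem.Set.issubset (PySem.Set.ofList (PySem.List.pyRange lo (hi + 1) 1)) (PySem.Set.ofList fl) = true)
      ↔ ∀ j : Int, lo ≤ j → j ≤ hi → j ∈ fl := by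
    rw [PySem.Set.issubset_iff]
    constructor
    · intro h j h1 h2
      have : j ∈ PySem.Set.ofList (PySem.List.pyRange lo (hi + 1) 1) := by
        rw [PySem.Set.mem_ofList, PySem.List.mem_pyRange_one]; omega
      exact (PySem.Set.mem_ofList _ _).mp (h _ this)
    · intro h x hx
      rw [PySem.Set.mem_ofList, PySem.List.mem_pyRange_one] at hx
      rw [PySem.Set.mem_ofList]
      exact h x hx.1 (by omega)
  rw [hL]
  by_cases hempty : lo > hi
  · constructor
    · intro _; exact Or.inl hempty
    · intro _ j h1 h2; omega
  · push Not at hempty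
    constructor
    · intro hall
      have hlo : lo ∈ vals := (hmemv lo).mpr (hall lo le_rfl hempty)
      obtain ⟨h, hget⟩ := hsome lo hlo
      obtain ⟨_, hle, _, hout⟩ := hspec _ _ hget
      refine Or.inr ⟨?_, ?_⟩
      · rw [PySem.Dict.contains_eq_isSome_get?, hget]; rfl
      · rw [PySem.Dict.getD_eq_get?_getD, hget]
        show h ≥ hi
        by_contra hc
        push Not at hc
        exact hout ((hmemv (h + 1)).mpr (hall (h + 1) (by omega) (by omega)))
    · rintro (hc | ⟨hcont, hge⟩)
      · omega
      · rw [PySem.Dict.contains_eq_isSome_get?] at hcont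
        cases hget : (buildRun vals).get? lo with
        | none => rw [hget] at hcont; exact Bool.noConfusion hcont
        | some h =>
          rw [PySem.Dict.getD_eq_get?_getD, hget] at hge
          simp only [Option.getD_some] at hge
          obtain ⟨_, _, hall, _⟩ := hspec _ _ hget
          intro j h1 h2
          exact (hmemv j).mp (hall j h1 (le_trans h2 hge))

theorem foldl_fun_ext {α β : Type} (f g : β → α → β) (l : List α) (init : β)
    (h : ∀ b a, f b a = g b a) : List.foldl f init l = List.foldl g init l := by
  have hfg : f = g := funext fun b => funext fun a => h b a
  rw [hfg]

-- ===== VERDICT (by name: the statement is the Claim_ definition above) =====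
theorem is_satisfy_spec : Claim_equal_is_satisfy := by
  intro frame_list past_num future_num frame_interval _
  unfold Spec_is_satisfy is_satisfy is_satisfy_alt
  simp only [List.foldl_reverse]
  set fl := PySem.List.sorted frame_list (fun x => x) false with hfl
  set vals := PySem.List.sorted (PySem.Set.ofList fl) (fun x => x) false with hvals
  have hrun : vals.foldr (fun v d => d.insert v (d.getD (v + 1) v)) (PySem.Dict.empty : PySem.Dict Int Int) = buildRun vals := rfl
  rw [hrun]
  have hstep : ∀ (acc : List Int) (i : Int),
      (if PySem.Set.issubset (PySem.Set.ofList (PySem.List.pyRange (i - past_num) (i + future_num + 1) 1)) (PySem.Set.ofList fl) then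
        if acc.length > 0 ∧ i < PySem.List.pyGetD acc (-1) 0 + frame_interval then acc else acc ++ [i]
      else acc)
      = (if i - past_num > i + future_num ∨ ((buildRun vals).contains (i - past_num) = true ∧ (buildRun vals).getD (i - past_num) 0 ≥ i + future_num) then
          if acc = [] ∨ i ≥ PySem.List.pyGetD acc (-1) 0 + frame_interval then acc ++ [i] else acc
        else acc) := by
    intro acc i
    have hc := window_iff fl (i - past_num) (i + future_num)
    rw [← hvals] at hc
    by_cases h1 : PySem.Set.issubset (PySem.Set.ofList (PySem.List.pyRange (i - past_num) (i + future_num + 1) 1)) (PySem.Set.ofList fl) = true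
    · rw [if_pos h1, if_pos (hc.mp h1)]
      by_cases h2 : acc.length > 0 ∧ i < PySem.List.pyGetD acc (-1) 0 + frame_interval
      · rw [if_pos h2, if_neg]
        rintro (he | hge)
        · rw [he] at h2; simp at h2
        · omega
      · rw [if_neg h2, if_pos]
        rw [Decidable.not_and_iff_or_not] at h2
        rcases h2 with h2 | h2
        · left
          simpa using List.length_eq_zero_iff.mp (by omega)
        · right; omega
    · rw [if_neg h1, if_neg (fun hb => h1 (hc.mpr hb))]
  exact foldl_fun_ext _ _ fl [] (fun acc i => hstep acc i)
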